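-- pv_equiv track=rewrite | github.com/KohlhaseJ/battlesnake | server_logic.py | avoid_snake
-- ===== SOURCE A (Python) =====
-- from typing import List, Dict
--
-- def avoid_snake(my_head: Dict[str, int], snake_body: List[dict], possible_moves: List[str]) -> List[str]:
--     for i in range(0, len(snake_body)):
--         body_part = snake_body[i]
--         if body_part["y"] == my_head["y"]:
--             difference = body_part["x"] - my_head["x"]
--             if difference == 1:
--                 try_remove_move("right", possible_moves)
--             elif difference == -1:
--                 try_remove_move("left", possible_moves)
--
--         if body_part["x"] == my_head["x"]:
--             difference = body_part["y"] - my_head["y"]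
--             if difference == 1:
--                 try_remove_move("up", possible_moves)
--             elif difference == -1:
--                 try_remove_move("down", possible_moves)
--
--     return possible_moves
--
-- def try_remove_move(move, possible_moves):
--     if move in possible_moves:
--         possible_moves.remove(move)
-- ===== SOURCE B (Python) =====
-- def avoid_snake(my_head, snake_body, possible_moves):
--     blocked = {(p["x"] - my_head["x"], p["y"] - my_head["y"]) for p in snake_body}
--     for move, delta in (("right", (1, 0)), ("left", (-1, 0)), ("up", (0, 1)), ("down", (0, -1))):
--         if delta in blocked and move in possible_moves:
--             possible_moves.remove(move)
--     return possible_moves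
-- ===== Notes on version B (the rewrite author's own statement) =====
-- stated objective: simpler
-- what changed: B builds the set of body-part offsets relative to the head once and checks only the four direction deltas against it, instead of scanning every body part with per-part conditional removals; it removes each blocked move at most once.
import Mathlib
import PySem

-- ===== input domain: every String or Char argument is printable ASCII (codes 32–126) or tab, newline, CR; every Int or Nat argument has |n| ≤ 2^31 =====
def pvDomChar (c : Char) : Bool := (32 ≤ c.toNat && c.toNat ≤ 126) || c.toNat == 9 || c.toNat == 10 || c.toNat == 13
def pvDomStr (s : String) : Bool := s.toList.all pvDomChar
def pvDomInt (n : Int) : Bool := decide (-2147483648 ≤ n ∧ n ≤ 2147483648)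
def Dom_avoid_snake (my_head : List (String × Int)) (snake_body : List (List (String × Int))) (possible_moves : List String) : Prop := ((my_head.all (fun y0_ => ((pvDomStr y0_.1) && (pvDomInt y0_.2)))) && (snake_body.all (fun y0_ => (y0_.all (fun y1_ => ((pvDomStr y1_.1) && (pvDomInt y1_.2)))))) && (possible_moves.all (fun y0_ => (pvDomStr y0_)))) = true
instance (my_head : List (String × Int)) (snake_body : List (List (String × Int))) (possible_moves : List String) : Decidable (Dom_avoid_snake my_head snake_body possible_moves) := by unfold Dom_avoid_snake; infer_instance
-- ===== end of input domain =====

-- B: builds the set of body-part offsets relative to the head once and tests only the four direction deltas (simpler).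
-- Equivalence is about the RETURN value; both Pythons mutate possible_moves in place and return it.

-- ===== PORT A =====
-- dict lookup; exact under Pre_ (key present where accessed)
def pvGet (d : List (String × Int)) (k : String) : Int := PySem.Dict.getD (PySem.Dict.mk d) k 0

def try_remove_move (move : String) (pm : List String) : List String :=
  if pm.contains move then (PySem.List.remove? pm move).getD pm else pm

def avoid_snake (my_head : List (String × Int)) (snake_body : List (List (String × Int))) (possible_moves : List String) : List String :=
  snake_body.foldl (fun pm body_part =>
    let pm1 :=
      if pvGet body_part "y" = pvGet my_head "y" then
        let difference := pvGet body_part "x" - pvGet my_head "x"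
        if difference = 1 then try_remove_move "right" pm
        else if difference = -1 then try_remove_move "left" pm
        else pm
      else pm
    if pvGet body_part "x" = pvGet my_head "x" then
      let difference := pvGet body_part "y" - pvGet my_head "y"
      if difference = 1 then try_remove_move "up" pm1
      else if difference = -1 then try_remove_move "down" pm1
      else pm1
    else pm1) possible_moves

-- ===== PORT B =====
def avoid_snake_alt (my_head : List (String × Int)) (snake_body : List (List (String × Int))) (possible_moves : List String) : List String :=
  let blocked : PySem.Set (Int × Int) :=
    PySem.Set.ofList (snake_body.map (fun p =>
      (pvGet p "x" - pvGet my_head "x", pvGet p "y" - pvGet my_head "y")))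
  [("right", ((1 : Int), (0 : Int))), ("left", (-1, 0)), ("up", (0, 1)), ("down", (0, -1))].foldl
    (fun pm d =>
      if PySem.Set.contains blocked d.2 && pm.contains d.1 then
        (PySem.List.remove? pm d.1).getD pm
      else pm) possible_moves

-- ===== PRECONDITION & SPEC =====
-- Pre_ excludes inputs where snake_body is nonempty and "x"/"y" is missing from my_head or a body part
-- (there both A and B raise KeyError), and possible_moves with duplicate entries, on which A's
-- one-removal-per-blocking-body-part count is accidental (B removes each blocked move once).
def Pre_avoid_snake (my_head : List (String × Int)) (snake_body : List (List (String × Int))) (possible_moves : List String) : Prop :=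
  (snake_body = [] ∨
    (PySem.Dict.contains (PySem.Dict.mk my_head) "x" = true ∧
     PySem.Dict.contains (PySem.Dict.mk my_head) "y" = true ∧
     (∀ p ∈ snake_body, PySem.Dict.contains (PySem.Dict.mk p) "x" = true ∧
        PySem.Dict.contains (PySem.Dict.mk p) "y" = true))) ∧
  possible_moves.Nodup
instance (my_head : List (String × Int)) (snake_body : List (List (String × Int))) (possible_moves : List String) : Decidable (Pre_avoid_snake my_head snake_body possible_moves) := by unfold Pre_avoid_snake; infer_instance

def pvWitness_avoid_snake : (List (String × Int)) × (List (List (String × Int))) × List String :=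
  ([("x", 5), ("y", 5)], [[("x", 6), ("y", 5)], [("x", 5), ("y", 4)]], ["up", "down", "left", "right"])

def Spec_avoid_snake (my_head : List (String × Int)) (snake_body : List (List (String × Int))) (possible_moves : List String) (out : List String) : Prop := out = avoid_snake_alt my_head snake_body possible_moves
instance (my_head : List (String × Int)) (snake_body : List (List (String × Int))) (possible_moves : List String) (out : List String) : Decidable (Spec_avoid_snake my_head snake_body possible_moves out) := by unfold Spec_avoid_snake; infer_instance

-- ===== CLAIM (what is proved, stated in full; the proofs are below) =====
def Claim_equal_avoid_snake : Prop := ∀ (my_head : List (String × Int)) (snake_body : List (List (String × Int))) (possible_moves : List String), Dom_avoid_snake my_head snake_body possible_moves → Pre_avoid_snake my_head snake_body possible_moves → Spec_avoid_snake my_head snake_body possible_moves (avoid_snake my_head snake_body possible_moves)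

-- ===== LEMMAS AND PROOFS =====

-- whether body part p blocks move m from head my_head (A's per-part removal condition)
def hits (my_head p : List (String × Int)) (m : String) : Bool :=
  (m == "right" && pvGet p "y" == pvGet my_head "y" && pvGet p "x" - pvGet my_head "x" == 1) ||
  (m == "left"  && pvGet p "y" == pvGet my_head "y" && pvGet p "x" - pvGet my_head "x" == -1) ||
  (m == "up"    && pvGet p "x" == pvGet my_head "x" && pvGet p "y" - pvGet my_head "y" == 1) ||
  (m == "down"  && pvGet p "x" == pvGet my_head "x" && pvGet p "y" - pvGet my_head "y" == -1)

theorem try_remove_eq_filter (m : String) (pm : List String) (h : pm.Nodup) :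
    try_remove_move m pm = pm.filter (fun x => !(x == m)) := by
  unfold try_remove_move
  by_cases hm : m ∈ pm
  · rw [if_pos (by simpa using hm), PySem.List.remove?_eq_some_erase pm m hm]
    simpa using List.Nodup.erase_eq_filter h m
  · rw [if_neg (by simpa using hm)]
    symm; apply List.filter_eq_self.2
    intro x hx; simp; rintro rfl; exact hm hx

theorem stepA_eq (my_head p : List (String × Int)) (pm : List String) (h : pm.Nodup) :
    (if pvGet p "x" = pvGet my_head "x" then
       if pvGet p "y" - pvGet my_head "y" = 1 then
         try_remove_move "up"
           (if pvGet p "y" = pvGet my_head "y" then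
              if pvGet p "x" - pvGet my_head "x" = 1 then try_remove_move "right" pm
              else if pvGet p "x" - pvGet my_head "x" = -1 then try_remove_move "left" pm
              else pm
            else pm)
       else if pvGet p "y" - pvGet my_head "y" = -1 then
         try_remove_move "down"
           (if pvGet p "y" = pvGet my_head "y" then
              if pvGet p "x" - pvGet my_head "x" = 1 then try_remove_move "right" pm
              else if pvGet p "x" - pvGet my_head "x" = -1 then try_remove_move "left" pm
              else pm
            else pm)
       else
         (if pvGet p "y" = pvGet my_head "y" then
            if pvGet p "x" - pvGet my_head "x" = 1 then try_remove_move "right" pm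
            else if pvGet p "x" - pvGet my_head "x" = -1 then try_remove_move "left" pm
            else pm
          else pm)
     else
       (if pvGet p "y" = pvGet my_head "y" then
          if pvGet p "x" - pvGet my_head "x" = 1 then try_remove_move "right" pm
          else if pvGet p "x" - pvGet my_head "x" = -1 then try_remove_move "left" pm
          else pm
        else pm))
    = pm.filter (fun m => !(hits my_head p m)) := by
  by_cases c4 : pvGet p "x" = pvGet my_head "x"
  · have hpm1 :
        (if pvGet p "y" = pvGet my_head "y" then
           if pvGet p "x" - pvGet my_head "x" = 1 then try_remove_move "right" pm
           else if pvGet p "x" - pvGet my_head "x" = -1 then try_remove_move "left" pm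
           else pm
         else pm) = pm := by
      split_ifs <;> first | rfl | omega
    rw [if_pos c4, hpm1]
    by_cases c5 : pvGet p "y" - pvGet my_head "y" = 1
    · rw [if_pos c5, try_remove_eq_filter _ _ h]
      refine List.filter_congr fun m _ => ?_
      simp [hits, c4, c5]
    · by_cases c6 : pvGet p "y" - pvGet my_head "y" = -1
      · rw [if_neg c5, if_pos c6, try_remove_eq_filter _ _ h]
        refine List.filter_congr fun m _ => ?_
        simp [hits, c4, c6]
      · rw [if_neg c5, if_neg c6]
        symm; apply List.filter_eq_self.2
        intro m _
        have h2 : ¬ pvGet p "x" - pvGet my_head "x" = 1 := by omega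
        have h3 : ¬ pvGet p "x" - pvGet my_head "x" = -1 := by omega
        simp [hits, c5, c6, h2, h3]
  · rw [if_neg c4]
    by_cases c1 : pvGet p "y" = pvGet my_head "y"
    · rw [if_pos c1]
      by_cases c2 : pvGet p "x" - pvGet my_head "x" = 1
      · rw [if_pos c2, try_remove_eq_filter _ _ h]
        refine List.filter_congr fun m _ => ?_
        simp [hits, c1, c2]
      · by_cases c3 : pvGet p "x" - pvGet my_head "x" = -1
        · rw [if_neg c2, if_pos c3, try_remove_eq_filter _ _ h]
          refine List.filter_congr fun m _ => ?_
          simp [hits, c1, c3]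
        · rw [if_neg c2, if_neg c3]
          symm; apply List.filter_eq_self.2
          intro m _
          simp [hits, c2, c3, c4]
    · rw [if_neg c1]
      symm; apply List.filter_eq_self.2
      intro m _
      simp [hits, c1, c4]

theorem foldA_eq_filter (my_head : List (String × Int)) (body : List (List (String × Int)))
    (pm : List String) (h : pm.Nodup) :
    avoid_snake my_head body pm = pm.filter (fun m => !(body.any (fun p => hits my_head p m))) := by
  induction body generalizing pm with
  | nil => simp [avoid_snake]
  | cons p rest ih =>
    have e1 : avoid_snake my_head (p :: rest) pm =
        avoid_snake my_head rest
          (if pvGet p "x" = pvGet my_head "x" then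
             if pvGet p "y" - pvGet my_head "y" = 1 then
               try_remove_move "up"
                 (if pvGet p "y" = pvGet my_head "y" then
                    if pvGet p "x" - pvGet my_head "x" = 1 then try_remove_move "right" pm
                    else if pvGet p "x" - pvGet my_head "x" = -1 then try_remove_move "left" pm
                    else pm
                  else pm)
             else if pvGet p "y" - pvGet my_head "y" = -1 then
               try_remove_move "down"
                 (if pvGet p "y" = pvGet my_head "y" then
                    if pvGet p "x" - pvGet my_head "x" = 1 then try_remove_move "right" pm
                    else if pvGet p "x" - pvGet my_head "x" = -1 then try_remove_move "left" pm
                    else pm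
                  else pm)
             else
               (if pvGet p "y" = pvGet my_head "y" then
                  if pvGet p "x" - pvGet my_head "x" = 1 then try_remove_move "right" pm
                  else if pvGet p "x" - pvGet my_head "x" = -1 then try_remove_move "left" pm
                  else pm
                else pm)
           else
             (if pvGet p "y" = pvGet my_head "y" then
                if pvGet p "x" - pvGet my_head "x" = 1 then try_remove_move "right" pm
                else if pvGet p "x" - pvGet my_head "x" = -1 then try_remove_move "left" pm
                else pm
              else pm)) := rfl
    rw [e1, stepA_eq my_head p pm h, ih _ (List.Nodup.filter _ h), List.filter_filter]
    refine List.filter_congr fun m _ => ?_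
    simp [Bool.not_or, Bool.and_comm]

theorem contains_blocked (my_head : List (String × Int)) (body : List (List (String × Int))) (a b : Int) :
    PySem.Set.contains
        (PySem.Set.ofList (body.map (fun p =>
          (pvGet p "x" - pvGet my_head "x", pvGet p "y" - pvGet my_head "y")))) (a, b)
      = body.any (fun p =>
          pvGet p "x" - pvGet my_head "x" == a && pvGet p "y" - pvGet my_head "y" == b) := by
  rw [Bool.eq_iff_iff, PySem.Set.contains_iff, PySem.Set.mem_ofList, List.any_eq_true]
  rw [List.mem_map]
  constructor
  · rintro ⟨q, hq, hqe⟩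
    exact ⟨q, hq, by simp [Prod.ext_iff] at hqe ⊢; exact ⟨hqe.1, hqe.2⟩⟩
  · rintro ⟨q, hq, hqe⟩
    exact ⟨q, hq, by simp at hqe ⊢; exact ⟨hqe.1, hqe.2⟩⟩

theorem stepB_eq (occ : PySem.Set (Int × Int)) (c : Int × Int) (mv : String) (pm : List String)
    (h : pm.Nodup) :
    (if PySem.Set.contains occ c && pm.contains mv then (PySem.List.remove? pm mv).getD pm else pm)
      = pm.filter (fun x => !(x == mv && PySem.Set.contains occ c)) := by
  by_cases hc : PySem.Set.contains occ c = true
  · have hc' : c ∈ occ := (PySem.Set.contains_iff occ c).1 hc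
    by_cases hm : mv ∈ pm
    · rw [if_pos (by simp [hc', hm]), PySem.List.remove?_eq_some_erase pm mv hm]
      rw [show ((some (pm.erase mv)).getD pm) = pm.erase mv from rfl,
          List.Nodup.erase_eq_filter h mv]
      exact List.filter_congr fun x _ => by simp [hc', bne]
    · rw [if_neg (by simp [hm])]
      symm; apply List.filter_eq_self.2
      intro x hx; simp
      exact Or.inl fun e => hm (e ▸ hx)
  · have hc' : c ∉ occ := fun hmem => hc ((PySem.Set.contains_iff occ c).2 hmem)
    rw [if_neg (by simp; intro hmem; exact (hc' hmem).elim)]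
    symm; apply List.filter_eq_self.2
    intro x _; simp
    exact Or.inr hc'

theorem foldB_eq_filter (my_head : List (String × Int)) (body : List (List (String × Int)))
    (pm : List String) (h : pm.Nodup) :
    avoid_snake_alt my_head body pm = pm.filter (fun m => !(body.any (fun p => hits my_head p m))) := by
  have hN1 := List.Nodup.filter (fun x =>
    !(x == "right" && PySem.Set.contains
        (PySem.Set.ofList (body.map (fun p =>
          (pvGet p "x" - pvGet my_head "x", pvGet p "y" - pvGet my_head "y")))) ((1 : Int), (0 : Int)))) h
  simp only [avoid_snake_alt, List.foldl_cons, List.foldl_nil]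
  rw [stepB_eq _ _ _ pm h]
  rw [stepB_eq _ _ _ _ hN1]
  rw [stepB_eq _ _ _ _ (List.Nodup.filter _ hN1)]
  rw [stepB_eq _ _ _ _ (List.Nodup.filter _ (List.Nodup.filter _ hN1))]
  rw [List.filter_filter, List.filter_filter, List.filter_filter]
  refine List.filter_congr fun m _ => ?_
  rw [contains_blocked, contains_blocked, contains_blocked, contains_blocked]
  by_cases h1 : m = "right"
  · subst h1
    simp only [hits]
    rw [Bool.eq_iff_iff]
    simp
    constructor
    · intro hh q hq; have := hh q hq; omega
    · intro hh q hq; have := hh q hq; omega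
  · by_cases h2 : m = "left"
    · subst h2
      simp only [hits]
      rw [Bool.eq_iff_iff]
      simp
      constructor
      · intro hh q hq; have := hh q hq; omega
      · intro hh q hq; have := hh q hq; omega
    · by_cases h3 : m = "up"
      · subst h3
        simp only [hits]
        rw [Bool.eq_iff_iff]
        simp
        constructor
        · intro hh q hq; have := hh q hq; omega
        · intro hh q hq; have := hh q hq; omega
      · by_cases h4 : m = "down"
        · subst h4
          simp only [hits]
          rw [Bool.eq_iff_iff]
          simp
          constructor
          · intro hh q hq; have := hh q hq; omega
          · intro hh q hq; have := hh q hq; omega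
        · rw [Bool.eq_iff_iff]
          simp [hits, h1, h2, h3, h4]

-- ===== VERDICT (by name: the statement is the Claim_ definition above) =====
theorem avoid_snake_spec : Claim_equal_avoid_snake := by
  intro my_head snake_body possible_moves _ hpre
  unfold Spec_avoid_snake
  rw [foldA_eq_filter my_head snake_body possible_moves hpre.2,
      foldB_eq_filter my_head snake_body possible_moves hpre.2]
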